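-- pv_equiv track=rewrite | github.com/iptch/advent-of-code-ipt | 2025/NKE/03/main.py | max_12_subsequence
-- ===== SOURCE A (Python) =====
-- def max_12_subsequence(line):
--     k = 12
--     num_drops = len(line) - k
--     stack = []
--
--     for d in line:
--         while num_drops > 0 and stack and stack[-1] < d:
--             stack.pop()
--             num_drops -=1
--         stack.append(d)
--
--     while num_drops > 0:
--         stack.pop()
--         num_drops -= 1
--
--     return ''.join(stack[:k])
-- ===== SOURCE B (Python) =====
-- def max_12_subsequence(line):
--     k = 12
--     n = len(line)
--     if n <= k:
--         return line
--     res = []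
--     start = 0
--     for i in range(k):
--         window = line[start:n - k + i + 1]
--         m = max(window)
--         j = window.index(m)
--         res.append(m)
--         start += j + 1
--     return ''.join(res)
-- ===== Notes on version B (the rewrite author's own statement) =====
-- stated objective: alternative
-- what changed: Replaces A's single-pass stack with a drop budget by a 12-round window selection: each round picks the earliest maximum character of the feasible window line[start : n-12+i+1] and advances start past it.
import Mathlib
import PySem

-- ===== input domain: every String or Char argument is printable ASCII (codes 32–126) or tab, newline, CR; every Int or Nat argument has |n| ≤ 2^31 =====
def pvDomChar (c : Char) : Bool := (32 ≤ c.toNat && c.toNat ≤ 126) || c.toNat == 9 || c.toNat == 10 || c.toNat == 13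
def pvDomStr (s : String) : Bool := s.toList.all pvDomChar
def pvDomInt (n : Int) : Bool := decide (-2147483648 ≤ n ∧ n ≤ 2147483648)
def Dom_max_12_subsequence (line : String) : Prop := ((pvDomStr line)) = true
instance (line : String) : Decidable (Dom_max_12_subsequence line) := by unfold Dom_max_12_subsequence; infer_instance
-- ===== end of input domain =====

-- B replaces A's drop-budget stack by a 12-round earliest-window-maximum selection (alternative algorithm, same results).

-- ===== PORT A =====
-- inner 'while num_drops > 0 and stack and stack[-1] < d' loop (stack[-1] is the last element)
def pvPopW (st : List Char) (nd : Int) (c : Char) : List Char × Int :=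
  match h : st.getLast? with
  | none => (st, nd)
  | some t =>
    if 0 < nd ∧ t < c then pvPopW st.dropLast (nd - 1) c else (st, nd)
termination_by st.length
decreasing_by
  cases st with
  | nil => simp at h
  | cons a as => simp [List.length_dropLast]

-- one iteration of the 'for d in line' loop
def pvStep (p : List Char × Int) (c : Char) : List Char × Int :=
  let q := pvPopW p.1 p.2 c
  (q.1 ++ [c], q.2)

-- trailing 'while num_drops > 0: stack.pop()' loop (the stack is provably nonempty at each pop)
def pvPopTail (st : List Char) (nd : Int) : List Char :=
  if 0 < nd then pvPopTail st.dropLast (nd - 1) else st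
termination_by nd.toNat
decreasing_by omega

def max_12_subsequence (line : String) : String :=
  let k : Int := 12
  let numDrops : Int := PySem.Str.len line - k
  let p := line.toList.foldl pvStep ([], numDrops)
  let st := pvPopTail p.1 p.2
  String.ofList (PySem.List.slice st none (some k))

-- ===== PORT B =====
-- one round: pick the earliest maximum of the window line[start : n-12+i+1]
def pvSelStep (cs : List Char) (n : Int) (p : List Char × Int) (i : Int) : List Char × Int :=
  let w := PySem.List.slice cs (some p.2) (some (n - 12 + i + 1))
  match PySem.List.max? w (fun x => x) with
  | none => p            -- unreachable: the window is nonempty on every round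
  | some m =>
    match PySem.List.index? w m with
    | none => p          -- unreachable: m ∈ w
    | some j => (p.1 ++ [m], p.2 + (j : Int) + 1)

def max_12_subsequence_alt (line : String) : String :=
  let k : Int := 12
  let n : Int := PySem.Str.len line
  if n ≤ k then line
  else
    let cs := line.toList
    let p := (PySem.List.pyRange 0 k 1).foldl (pvSelStep cs n) ([], 0)
    String.ofList p.1

-- ===== PRECONDITION & SPEC =====
def Spec_max_12_subsequence (line : String) (out : String) : Prop := out = max_12_subsequence_alt line
instance (line : String) (out : String) : Decidable (Spec_max_12_subsequence line out) := by unfold Spec_max_12_subsequence; infer_instance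

-- ===== CLAIM (what is proved, stated in full; the proofs are below) =====
def Claim_equal_max_12_subsequence : Prop := ∀ (line : String), Dom_max_12_subsequence line → Spec_max_12_subsequence line (max_12_subsequence line)

-- ===== LEMMAS AND PROOFS =====

-- the common specification: pick r chars greedily, each the earliest maximum of its feasible window
def pvSelect : List Char → Nat → List Char
  | _, 0 => []
  | cs, r+1 =>
    let b := cs.length - (r+1)
    match PySem.List.max? (cs.take (b+1)) (fun x => x) with
    | none => []
    | some m =>
      match PySem.List.index? (cs.take (b+1)) m with
      | none => []
      | some j => m :: pvSelect (cs.drop (j+1)) r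

lemma pvPopW_diff (st : List Char) (nd : Int) (c : Char) :
    (pvPopW st nd c).2 - ((pvPopW st nd c).1.length : Int) = nd - st.length := by
  fun_induction pvPopW st nd c with
  | case1 => simp
  | case2 st nd t hlast hcond ih =>
    have hne : st ≠ [] := by intro e; subst e; simp at hlast
    rw [ih]
    cases st with | nil => exact absurd rfl hne | cons a as => simp [List.length_dropLast]; omega
  | case3 => simp

lemma pvPopW_nonneg (st : List Char) (nd : Int) (c : Char) (h : 0 ≤ nd) :
    0 ≤ (pvPopW st nd c).2 := by
  fun_induction pvPopW st nd c with
  | case1 => simpa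
  | case2 st nd t hlast hcond ih => exact ih (by omega)
  | case3 => simpa

lemma pvPopW_subset (st : List Char) (nd : Int) (c : Char) (x : Char)
    (h : x ∈ (pvPopW st nd c).1) : x ∈ st := by
  fun_induction pvPopW st nd c with
  | case1 => simpa using h
  | case2 st nd t hlast hcond ih => exact List.dropLast_subset _ (ih h)
  | case3 => simpa using h

lemma pvPopW_nopop (st : List Char) (nd : Int) (c : Char) (h : nd ≤ 0) :
    pvPopW st nd c = (st, nd) := by
  fun_induction pvPopW st nd c with
  | case1 => rfl
  | case2 st nd t hlast hcond ih => exact absurd hcond.1 (by omega)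
  | case3 => rfl

lemma pvPopW_all (st : List Char) (nd : Int) (c : Char)
    (h1 : ∀ x ∈ st, x < c) (h2 : (st.length : Int) ≤ nd) :
    pvPopW st nd c = ([], nd - st.length) := by
  fun_induction pvPopW st nd c with
  | case1 st nd hlast =>
    have : st = [] := List.getLast?_eq_none_iff.mp hlast
    subst this; simp
  | case2 st nd t hlast hcond ih =>
    have hne : st ≠ [] := by intro e; subst e; simp at hlast
    have hlen : 0 < st.length := List.length_pos_iff.mpr hne
    rw [ih (fun x hx => h1 x (List.dropLast_subset _ hx))
        (by simp [List.length_dropLast]; omega)]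
    simp [List.length_dropLast]; omega
  | case3 st nd t hlast hcond =>
    exfalso
    have hm : t ∈ st := List.mem_of_getLast? hlast
    have hne : st ≠ [] := by intro e; subst e; simp at hlast
    have : 0 < st.length := List.length_pos_iff.mpr hne
    exact hcond ⟨by omega, h1 t hm⟩

lemma pvPopW_cons (st : List Char) (nd : Int) (c m : Char)
    (h : 0 < nd - st.length → c ≤ m) :
    pvPopW (m :: st) nd c = (m :: (pvPopW st nd c).1, (pvPopW st nd c).2) := by
  fun_induction pvPopW st nd c with
  | case1 st nd hlast =>
    have : st = [] := List.getLast?_eq_none_iff.mp hlast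
    subst this
    have h' : ¬ (0 < nd ∧ m < c) := by
      rintro ⟨h1', h2'⟩; exact absurd h2' (not_lt.mpr (h (by simpa using h1')))
    simp [pvPopW, h']
  | case2 st nd t hlast hcond ih =>
    have hne : st ≠ [] := by intro e; subst e; simp at hlast
    have hdl : (m :: st).dropLast = m :: st.dropLast := by
      cases st with
      | nil => exact absurd rfl hne
      | cons a as => simp
    have hgl : (m :: st).getLast? = some t := by
      cases st with
      | nil => exact absurd rfl hne
      | cons a as => rw [List.getLast?_cons_cons]; exact hlast
    rw [pvPopW, hgl]
    simp only [hcond, if_pos, and_self]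
    rw [hdl]
    refine ih ?_
    intro hlt
    apply h
    have hlen : 0 < st.length := List.length_pos_iff.mpr hne
    simp [List.length_dropLast] at hlt; omega
  | case3 st nd t hlast hcond =>
    have hne : st ≠ [] := by intro e; subst e; simp at hlast
    have hgl : (m :: st).getLast? = some t := by
      cases st with
      | nil => exact absurd rfl hne
      | cons a as => rw [List.getLast?_cons_cons]; exact hlast
    rw [pvPopW, hgl]
    simp [hcond]

lemma pvPopTail_take (st : List Char) (nd : Int) (h0 : 0 ≤ nd) (h1 : nd ≤ st.length) :
    pvPopTail st nd = st.take (st.length - nd.toNat) := by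
  fun_induction pvPopTail st nd with
  | case1 st nd hnd ih =>
    have hne : st ≠ [] := by intro e; subst e; simp at h1; omega
    have hlen : 0 < st.length := List.length_pos_iff.mpr hne
    rw [ih (by omega) (by simp [List.length_dropLast]; omega)]
    rw [List.dropLast_eq_take, List.take_take]
    congr 1
    simp [List.length_take]
    omega
  | case2 st nd hnd =>
    have : nd = 0 := by omega
    subst this
    simp

lemma pvFold_diff (t : List Char) (st : List Char) (nd : Int) :
    (t.foldl pvStep (st, nd)).2 - ((t.foldl pvStep (st, nd)).1.length : Int)
      = nd - st.length - t.length := by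
  induction t generalizing st nd with
  | nil => simp
  | cons c t ih =>
    simp only [List.foldl_cons]
    rw [show pvStep (st, nd) c = ((pvPopW st nd c).1 ++ [c], (pvPopW st nd c).2) from rfl]
    rw [ih]
    have := pvPopW_diff st nd c
    simp only [List.length_append, List.length_cons, List.length_nil]
    push_cast
    omega

lemma pvFold_nonneg (t : List Char) (p : List Char × Int) (h : 0 ≤ p.2) :
    0 ≤ (t.foldl pvStep p).2 := by
  induction t generalizing p with
  | nil => simpa
  | cons c t ih =>
    simp only [List.foldl_cons]
    exact ih _ (pvPopW_nonneg _ _ _ h)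

lemma pvFold_mem (t : List Char) (p : List Char × Int) (x : Char)
    (h : x ∈ (t.foldl pvStep p).1) : x ∈ p.1 ∨ x ∈ t := by
  induction t generalizing p with
  | nil => left; simpa using h
  | cons c t ih =>
    simp only [List.foldl_cons] at h
    rcases ih _ h with h1 | h1
    · simp only [pvStep, List.mem_append, List.mem_singleton] at h1
      rcases h1 with h2 | h2
      · exact Or.inl (pvPopW_subset _ _ _ _ h2)
      · subst h2; right; simp
    · right; simp [h1]

lemma pvFold_nopop (t : List Char) (st : List Char) (nd : Int) (h : nd ≤ 0) :
    t.foldl pvStep (st, nd) = (st ++ t, nd) := by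
  induction t generalizing st with
  | nil => simp
  | cons c t ih =>
    simp only [List.foldl_cons]
    rw [show pvStep (st, nd) c = ((pvPopW st nd c).1 ++ [c], (pvPopW st nd c).2) from rfl,
        pvPopW_nopop _ _ _ h]
    rw [ih]
    simp

lemma pvFold_takemax (u : List Char) (m : Char) (d : Int)
    (h1 : ∀ x ∈ u, x < m) (h2 : (u.length : Int) ≤ d) :
    (u ++ [m]).foldl pvStep ([], d) = ([m], d - u.length) := by
  rw [List.foldl_append]
  set p := u.foldl pvStep (([] : List Char), d) with hp
  have hdiff : p.2 - (p.1.length : Int) = d - u.length := by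
    have := pvFold_diff u [] d
    simpa using this
  have hmem : ∀ x ∈ p.1, x < m := by
    intro x hx
    rcases pvFold_mem u ([], d) x hx with h | h
    · simp at h
    · exact h1 x h
  simp only [List.foldl_cons, List.foldl_nil]
  rw [show pvStep p m = ((pvPopW p.1 p.2 m).1 ++ [m], (pvPopW p.1 p.2 m).2) from rfl,
      pvPopW_all p.1 p.2 m hmem (by omega)]
  simp
  omega

lemma pvFold_cons (t : List Char) (st : List Char) (nd : Int) (m : Char)
    (h : ∀ (i : Nat) (hi : i < t.length), (i : Int) < nd - st.length → t[i] ≤ m) :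
    t.foldl pvStep (m :: st, nd)
      = (m :: (t.foldl pvStep (st, nd)).1, (t.foldl pvStep (st, nd)).2) := by
  induction t generalizing st nd with
  | nil => simp
  | cons c t ih =>
    simp only [List.foldl_cons]
    rw [show pvStep (m :: st, nd) c = ((pvPopW (m :: st) nd c).1 ++ [c], (pvPopW (m :: st) nd c).2) from rfl]
    rw [show pvStep (st, nd) c = ((pvPopW st nd c).1 ++ [c], (pvPopW st nd c).2) from rfl]
    rw [pvPopW_cons st nd c m (fun hlt => h 0 (by simp) (by simpa using hlt))]
    rw [List.cons_append]
    refine ih ((pvPopW st nd c).1 ++ [c]) (pvPopW st nd c).2 ?_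
    intro i hi hlt
    have hdiff := pvPopW_diff st nd c
    have := h (i + 1) (by simpa using Nat.succ_lt_succ hi)
      (by simp only [List.length_append, List.length_cons, List.length_nil] at hlt ⊢
          push_cast at hlt ⊢
          omega)
    simpa using this

lemma pvFullrun_select (r : Nat) (cs : List Char) (h : r ≤ cs.length) :
    pvPopTail (cs.foldl pvStep ([], (cs.length : Int) - r)).1
              (cs.foldl pvStep ([], (cs.length : Int) - r)).2 = pvSelect cs r := by
  induction r generalizing cs with
  | zero =>
    simp only [Nat.cast_zero, sub_zero]
    have hd := pvFold_diff cs [] (cs.length : Int)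
    have hnn := pvFold_nonneg cs ([], (cs.length : Int)) (by simp)
    rw [pvPopTail_take _ _ hnn (by simp at hd; omega)]
    have hz : (cs.foldl pvStep ([], (cs.length : Int))).1.length
        - (cs.foldl pvStep ([], (cs.length : Int))).2.toNat = 0 := by
      simp at hd; omega
    rw [hz, List.take_zero]
    rfl
  | succ r ih =>
    simp only [Nat.cast_add, Nat.cast_one]
    -- window facts
    set n := cs.length with hn
    set b : Nat := n - (r + 1) with hbdef
    have hb1 : b + (r + 1) = n := by omega
    have hwlen : (cs.take (b + 1)).length = b + 1 := by
      simp; omega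
    have hwne : cs.take (b + 1) ≠ [] := by
      intro e; rw [e] at hwlen; simp at hwlen
    obtain ⟨m, hm⟩ : ∃ m, PySem.List.max? (cs.take (b + 1)) (fun x => x) = some m := by
      cases hq : PySem.List.max? (cs.take (b + 1)) (fun x => x) with
      | none => exact absurd ((PySem.List.max?_eq_none_iff _ _).mp hq) hwne
      | some m => exact ⟨m, rfl⟩
    have hmmem : m ∈ cs.take (b + 1) := PySem.List.max?_mem hm
    have hmax : ∀ y ∈ cs.take (b + 1), y ≤ m := fun y hy => PySem.List.max?_isMax hm y hy
    obtain ⟨j, hj⟩ : ∃ j, PySem.List.index? (cs.take (b + 1)) m = some j := by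
      cases hq : PySem.List.index? (cs.take (b + 1)) m with
      | none => exact absurd ((PySem.List.index?_eq_none_iff _ _).mp hq) (by simpa using hmmem)
      | some j => exact ⟨j, rfl⟩
    obtain ⟨hjlt, hjget, hjfirst⟩ := PySem.List.getElem_of_index?_eq_some hj
    have hjb : j ≤ b := by omega
    have hjn : j < n := by omega
    have hlt : ∀ (i : Nat) (hi : i < j), cs[i]'(by omega) < m := by
      intro i hi
      have h1 : (cs.take (b + 1))[i]'(by omega) = cs[i]'(by omega) := List.getElem_take
      have h2 := hmax _ (List.getElem_mem (l := cs.take (b + 1)) (n := i) (by omega))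
      have h3 := hjfirst i (by omega)
      rw [h1] at h2 h3
      exact lt_of_le_of_ne h2 h3
    have hget : cs[j]'hjn = m := by
      rw [← List.getElem_take (h := hjlt)]; exact hjget
    -- decompose cs
    have hsplit : cs = (cs.take j ++ [m]) ++ cs.drop (j + 1) := by
      conv_lhs => rw [← List.take_append_drop (j + 1) cs]
      rw [List.take_add_one]
      congr 2
      simp [List.getElem?_eq_getElem hjn, hget]
    set t := cs.drop (j + 1) with htdef
    have htlen : t.length = n - (j + 1) := by simp [htdef, hn]
    have htget : ∀ (i : Nat) (hi : i < t.length), (i : Int) < ((n : Int) - (r + 1)) - j → t[i] ≤ m := by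
      intro i hi hlt2
      have hidx : j + 1 + i < n := by omega
      have h1 : t[i]'hi = cs[j + 1 + i]'hidx := by
        simp [htdef, List.getElem_drop]
      have hib : j + 1 + i < b + 1 := by omega
      have h2 : (cs.take (b + 1))[j + 1 + i]'(by omega) = cs[j + 1 + i]'hidx := List.getElem_take
      have := hmax _ (List.getElem_mem (l := cs.take (b + 1)) (n := j + 1 + i) (by omega))
      rw [h2] at this
      rw [h1]; exact this
    -- A-side computation
    have hA : cs.foldl pvStep ([], (n : Int) - (r + 1))
        = (m :: (t.foldl pvStep ([], ((n : Int) - (r + 1)) - j)).1,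
           (t.foldl pvStep ([], ((n : Int) - (r + 1)) - j)).2) := by
      conv_lhs => rw [hsplit]
      rw [List.foldl_append]
      rw [pvFold_takemax (cs.take j) m _
          (by intro x hx
              obtain ⟨i, hi, hxi⟩ := List.mem_take_iff_getElem.mp hx
              subst hxi
              exact hlt i (by omega))
          (by rw [List.length_take_of_le (by omega)]; omega)]
      rw [List.length_take_of_le (by omega)]
      exact pvFold_cons t [] _ m (by simpa using htget)
    rw [hA]
    have hSd := pvFold_diff t [] (((n : Int) - (r + 1)) - j)
    simp only [List.length_nil, Nat.cast_zero, sub_zero] at hSd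
    have hSn : 0 ≤ (t.foldl pvStep ([], ((n : Int) - (r + 1)) - j)).2 :=
      pvFold_nonneg t _ (by simp; omega)
    set S := t.foldl pvStep ([], ((n : Int) - (r + 1)) - j) with hS
    have hSlen : S.2 ≤ (S.1.length : Int) := by rw [htlen] at hSd; omega
    have hpop : pvPopTail (m :: S.1) S.2 = m :: pvPopTail S.1 S.2 := by
      rw [pvPopTail_take _ _ hSn (by simp; omega),
          pvPopTail_take _ _ hSn (by omega)]
      have : (m :: S.1).length - S.2.toNat = (S.1.length - S.2.toNat) + 1 := by
        simp; omega
      rw [this, List.take_succ_cons]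
    rw [hpop]
    have harg : ((t.length : Int) - r) = ((n : Int) - (r + 1)) - j := by
      rw [htlen]; omega
    have hr : r ≤ t.length := by omega
    have := ih t hr
    rw [harg] at this
    rw [← hS] at this
    rw [this]
    -- B-side: unfold pvSelect
    conv_rhs => rw [pvSelect]
    rw [show cs.length - (r + 1) = b from rfl]
    simp only [hm, hj]
    rw [htdef]
  

lemma pvSelect_length (r : Nat) (cs : List Char) (h : r ≤ cs.length) :
    (pvSelect cs r).length = r := by
  induction r generalizing cs with
  | zero => rfl
  | succ r ih =>
    have hwlen : (cs.take (cs.length - (r + 1) + 1)).length = cs.length - (r + 1) + 1 := by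
      simp; omega
    have hwne : cs.take (cs.length - (r + 1) + 1) ≠ [] := by
      intro e; rw [e] at hwlen; simp at hwlen
    obtain ⟨m, hm⟩ : ∃ m, PySem.List.max? (cs.take (cs.length - (r + 1) + 1)) (fun x => x) = some m := by
      cases hq : PySem.List.max? (cs.take (cs.length - (r + 1) + 1)) (fun x => x) with
      | none => exact absurd ((PySem.List.max?_eq_none_iff _ _).mp hq) hwne
      | some m => exact ⟨m, rfl⟩
    obtain ⟨j, hj⟩ : ∃ j, PySem.List.index? (cs.take (cs.length - (r + 1) + 1)) m = some j := by
      cases hq : PySem.List.index? (cs.take (cs.length - (r + 1) + 1)) m with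
      | none => exact absurd ((PySem.List.index?_eq_none_iff _ _).mp hq) (by simpa using PySem.List.max?_mem hm)
      | some j => exact ⟨j, rfl⟩
    obtain ⟨hjlt, -, -⟩ := PySem.List.getElem_of_index?_eq_some hj
    rw [pvSelect]
    simp only [hm, hj, List.length_cons]
    rw [ih (cs.drop (j + 1)) (by simp; omega)]

lemma pvAlt_fold (r : Nat) (cs : List Char) (start : Nat) (res : List Char)
    (hr : r ≤ 12) (hs : start + r ≤ cs.length) :
    ((PySem.List.pyRange (12 - (r : Int)) 12 1).foldl (pvSelStep cs (cs.length : Int))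
        (res, (start : Int))).1 = res ++ pvSelect (cs.drop start) r := by
  induction r generalizing start res with
  | zero =>
    rw [show (12 - ((0 : Nat) : Int)) = 12 by norm_num,
        PySem.List.pyRange_one_eq_nil le_rfl]
    simp [pvSelect]
  | succ r ih =>
    have hcons : PySem.List.pyRange (12 - ((r + 1 : Nat) : Int)) 12 1
        = (12 - ((r + 1 : Nat) : Int)) :: PySem.List.pyRange (12 - ((r : Nat) : Int)) 12 1 := by
      rw [PySem.List.pyRange_one_cons (by push_cast; omega),
          show (12 - ((r + 1 : Nat) : Int)) + 1 = 12 - ((r : Nat) : Int) by push_cast; ring]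
    rw [hcons, List.foldl_cons]
    set t := cs.drop start with htdef
    have htlen : t.length = cs.length - start := by simp [htdef]
    have hw : PySem.List.slice cs (some ((start : Nat) : Int))
        (some ((cs.length : Int) - 12 + (12 - ((r + 1 : Nat) : Int)) + 1))
        = t.take (t.length - (r + 1) + 1) := by
      rw [show ((cs.length : Int) - 12 + (12 - ((r + 1 : Nat) : Int)) + 1)
          = ((cs.length : Int) - (r : Int)) by push_cast; ring]
      rw [PySem.List.slice_toNat _ (by positivity) (by omega)]
      congr 1
      omega
    have hwlen : (t.take (t.length - (r + 1) + 1)).length = t.length - (r + 1) + 1 := by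
      simp; omega
    have hwne : t.take (t.length - (r + 1) + 1) ≠ [] := by
      intro e; rw [e] at hwlen; simp at hwlen
    obtain ⟨m, hm⟩ : ∃ m, PySem.List.max? (t.take (t.length - (r + 1) + 1)) (fun x => x) = some m := by
      cases hq : PySem.List.max? (t.take (t.length - (r + 1) + 1)) (fun x => x) with
      | none => exact absurd ((PySem.List.max?_eq_none_iff _ _).mp hq) hwne
      | some m => exact ⟨m, rfl⟩
    obtain ⟨j, hj⟩ : ∃ j, PySem.List.index? (t.take (t.length - (r + 1) + 1)) m = some j := by
      cases hq : PySem.List.index? (t.take (t.length - (r + 1) + 1)) m with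
      | none => exact absurd ((PySem.List.index?_eq_none_iff _ _).mp hq) (by simpa using PySem.List.max?_mem hm)
      | some j => exact ⟨j, rfl⟩
    obtain ⟨hjlt, -, -⟩ := PySem.List.getElem_of_index?_eq_some hj
    have hstep : pvSelStep cs (cs.length : Int) (res, ((start : Nat) : Int)) (12 - ((r + 1 : Nat) : Int))
        = (res ++ [m], ((start : Int) + (j : Int) + 1)) := by
      simp only [pvSelStep]
      rw [hw]
      simp only [hm, hj]
    rw [hstep,
        show ((start : Int) + (j : Int) + 1) = (((start + j + 1 : Nat)) : Int) by push_cast; ring]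
    have hr' : r ≤ 12 := by omega
    have hs' : start + j + 1 + r ≤ cs.length := by omega
    rw [ih (start + j + 1) (res ++ [m]) hr' hs']
    rw [show cs.drop (start + j + 1) = t.drop (j + 1) from by rw [htdef, List.drop_drop, Nat.add_assoc]]
    conv_rhs => rw [pvSelect]
    simp only [hm, hj]
    simp

-- ===== VERDICT (by name: the statement is the Claim_ definition above) =====
theorem max_12_subsequence_spec : Claim_equal_max_12_subsequence := by
  intro line _
  unfold Spec_max_12_subsequence max_12_subsequence max_12_subsequence_alt
  simp only [PySem.Str.len_eq]
  set cs := line.toList with hcs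
  by_cases hn : (cs.length : Int) ≤ 12
  · -- short input: both return the line unchanged
    rw [if_pos hn]
    rw [pvFold_nopop cs [] _ (by omega)]
    rw [List.nil_append]
    show String.ofList (PySem.List.slice (pvPopTail cs ((cs.length : Int) - 12)) none (some 12)) = line
    rw [pvPopTail, if_neg (by omega)]
    rw [PySem.List.slice_to _ (by norm_num)]
    rw [show ((12 : Int)).toNat = 12 from rfl]
    rw [List.take_of_length_le (by omega)]
    rw [hcs, String.ofList_toList]
  · -- long input: both compute the 12-round greedy selection
    rw [if_neg hn]
    have h12 : 12 ≤ cs.length := by omega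
    have hA := pvFullrun_select 12 cs h12
    rw [show ((cs.length : Int) - 12) = ((cs.length : Int) - ((12 : Nat) : Int)) from by norm_num]
    rw [hA]
    have hB := pvAlt_fold 12 cs 0 [] (by norm_num) (by omega)
    rw [show ((0 : Nat) : Int) = (0 : Int) from rfl] at hB
    rw [show (12 - ((12 : Nat) : Int)) = (0 : Int) from by norm_num] at hB
    simp only [List.drop_zero, List.nil_append] at hB
    rw [hB]
    rw [PySem.List.slice_to _ (by norm_num)]
    rw [show ((12 : Int)).toNat = 12 from rfl]
    rw [List.take_of_length_le (by rw [pvSelect_length 12 cs h12])]
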